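-- pv_equiv track=rewrite | github.com/alterPublics/spreadAnalysis | spreadAnalysis/analysis/batching.py | bi_to_uni
-- ===== SOURCE A (Python) =====
-- def bi_to_uni(data):
--
-- 	rep_data = {}
-- 	for k,v in data.items():
-- 		for n1 in v:
-- 			for n2 in v:
-- 				if n1[0] != n2[0]:
-- 					if (n1[0],n2[0]) in rep_data:
-- 						rep_data[(n1[0],n2[0])]+=n1[1]
-- 					elif (n2[0],n1[0]) in rep_data:
-- 						rep_data[(n2[0],n1[0])]+=n2[1]
-- 					else:
-- 						rep_data[(n1[0],n2[0])]=n1[1]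
-- 	return rep_data
-- ===== SOURCE B (Python) =====
-- def bi_to_uni(data):
--     rep_data = {}
--     for k, v in data.items():
--         # one pass: per-id aggregate (total weight, count) and first-appearance order
--         agg = {}
--         order = []
--         for nid, w in v:
--             if nid in agg:
--                 t = agg[nid]
--                 agg[nid] = (t[0] + w, t[1] + 1)
--             else:
--                 agg[nid] = (w, 1)
--                 order.append(nid)
--         # one dict operation per unordered pair of distinct ids
--         for i, a in enumerate(order):
--             wa, ca = agg[a]
--             for b in order[i + 1:]:
--                 wb, cb = agg[b]
--                 if (a, b) in rep_data:
--                     rep_data[(a, b)] += 2 * wa * cb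
--                 elif (b, a) in rep_data:
--                     rep_data[(b, a)] += 2 * wb * ca
--                 else:
--                     rep_data[(a, b)] = 2 * wa * cb
--     return rep_data
-- ===== Notes on version B (the rewrite author's own statement) =====
-- stated objective: alternative
-- what changed: Per group, instead of the node-by-node double loop (one dict update per ordered node pair), B builds one aggregate table id -> (total weight, count) in first-appearance order and performs a single dict update of 2*W_first*count_other per unordered pair of distinct ids, reusing the stored key orientation.
import Mathlib
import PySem

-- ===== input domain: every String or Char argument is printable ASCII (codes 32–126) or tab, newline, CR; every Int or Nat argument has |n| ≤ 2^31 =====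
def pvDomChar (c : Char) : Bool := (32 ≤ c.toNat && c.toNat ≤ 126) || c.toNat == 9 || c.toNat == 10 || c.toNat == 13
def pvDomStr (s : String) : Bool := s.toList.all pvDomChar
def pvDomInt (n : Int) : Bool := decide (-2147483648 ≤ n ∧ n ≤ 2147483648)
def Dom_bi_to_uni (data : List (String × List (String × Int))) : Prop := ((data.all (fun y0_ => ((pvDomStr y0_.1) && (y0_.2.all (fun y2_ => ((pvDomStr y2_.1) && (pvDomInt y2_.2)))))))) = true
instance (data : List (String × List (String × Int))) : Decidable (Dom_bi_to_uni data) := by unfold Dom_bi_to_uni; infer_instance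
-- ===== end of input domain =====

-- B replaces A's node×node double loop per group by a per-id aggregate table (total weight,
-- count, first-appearance order) plus one dict operation per unordered pair of distinct ids
-- (objective: alternative algorithm; same return value, including dict insertion order).


-- ===== PORT A =====
def bi_to_uni (data : List (String × List (String × Int))) : List (String × String × Int) :=
  (data.foldl (fun rep kv =>
    kv.2.foldl (fun rep n1 =>
      kv.2.foldl (fun rep n2 =>
        if n1.1 ≠ n2.1 then
          if rep.contains (n1.1, n2.1) then
            rep.insert (n1.1, n2.1) (rep.getD (n1.1, n2.1) 0 + n1.2)
          else if rep.contains (n2.1, n1.1) then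
            rep.insert (n2.1, n1.1) (rep.getD (n2.1, n1.1) 0 + n2.2)
          else rep.insert (n1.1, n2.1) n1.2
        else rep) rep) rep)
    (PySem.Dict.empty : PySem.Dict (String × String) Int)).items.map (fun e => (e.1.1, e.1.2, e.2))

-- ===== PORT B =====
-- per-group aggregate: dict id ↦ (total weight, count), plus first-appearance order list
def pvAgg (v : List (String × Int)) : PySem.Dict String (Int × Int) × List String :=
  v.foldl (fun st n =>
    if st.1.contains n.1 then
      (st.1.insert n.1 ((st.1.getD n.1 (0, 0)).1 + n.2, (st.1.getD n.1 (0, 0)).2 + 1), st.2)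
    else (st.1.insert n.1 (n.2, 1), st.2 ++ [n.1])) ((PySem.Dict.empty : PySem.Dict String (Int × Int)), [])


-- 'for i, a in enumerate(order): for b in order[i+1:]' as structural recursion on the order list
def pvPairLoop (agg : PySem.Dict String (Int × Int)) :
    List String → PySem.Dict (String × String) Int → PySem.Dict (String × String) Int
  | [], rep => rep
  | a :: rest, rep =>
    let wa := (agg.getD a (0, 0)).1
    let ca := (agg.getD a (0, 0)).2
    pvPairLoop agg rest (rest.foldl (fun rep b =>
      let wb := (agg.getD b (0, 0)).1
      let cb := (agg.getD b (0, 0)).2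
      if rep.contains (a, b) then rep.insert (a, b) (rep.getD (a, b) 0 + 2 * wa * cb)
      else if rep.contains (b, a) then rep.insert (b, a) (rep.getD (b, a) 0 + 2 * wb * ca)
      else rep.insert (a, b) (2 * wa * cb)) rep)

def bi_to_uni_alt (data : List (String × List (String × Int))) : List (String × String × Int) :=
  (data.foldl (fun rep kv =>
    let st := pvAgg kv.2
    pvPairLoop st.1 st.2 rep)
    (PySem.Dict.empty : PySem.Dict (String × String) Int)).items.map (fun e => (e.1.1, e.1.2, e.2))

-- ===== PRECONDITION & SPEC =====
def Spec_bi_to_uni (data : List (String × List (String × Int))) (out : List (String × String × Int)) : Prop := out = bi_to_uni_alt data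
instance (data : List (String × List (String × Int))) (out : List (String × String × Int)) : Decidable (Spec_bi_to_uni data out) := by unfold Spec_bi_to_uni; infer_instance

-- ===== CLAIM (what is proved, stated in full; the proofs are below) =====
def Claim_equal_bi_to_uni : Prop := ∀ (data : List (String × List (String × Int))), Dom_bi_to_uni data → Spec_bi_to_uni data (bi_to_uni data)

-- ===== LEMMAS AND PROOFS =====
-- Both per-group loops are folds of abstract "pair operations" ((a,b), amount-if-stored-(a,b),
-- amount-if-stored-(b,a)) over the association list behind rep_data; the characterization
-- theorem pvPhi reduces each loop to per-class totals plus first-seen fresh keys.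

def pvMatchK (k k' : String × String) : Bool :=
  decide (k = k') || decide (k.1 = k'.2 ∧ k.2 = k'.1)
def pvAnyM (ks : List (String × String)) (k : String × String) : Bool :=
  ks.any (fun k' => pvMatchK k' k)
def pvApplyL : List ((String × String) × Int) → ((String × String) × Int × Int) →
    List ((String × String) × Int)
  | [], op => [(op.1, op.2.1)]
  | e :: t, op =>
    if e.1 = op.1 then (e.1, e.2 + op.2.1) :: t
    else if e.1 = (op.1.2, op.1.1) then (e.1, e.2 + op.2.2) :: t
    else e :: pvApplyL t op
def pvCND (l : List ((String × String) × Int)) : Prop :=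
  (l.map Prod.fst).Pairwise (fun k k' => pvMatchK k k' = false)

theorem pvMatchK_iff (k k' : String × String) :
    pvMatchK k k' = true ↔ k = k' ∨ k = (k'.2, k'.1) := by
  simp [pvMatchK, Prod.ext_iff]

theorem pvMatchK_symm (k k' : String × String) : pvMatchK k k' = pvMatchK k' k := by
  rcases k with ⟨a, b⟩; rcases k' with ⟨c, d⟩
  simp only [pvMatchK, Prod.ext_iff]
  by_cases h1 : a = c <;> by_cases h2 : b = d <;> by_cases h3 : a = d <;> by_cases h4 : b = c <;>
    simp [h1, h2, h3, h4] <;> subst_vars <;> tauto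

theorem pvMatchK_self (k : String × String) : pvMatchK k k = true := by
  simp [pvMatchK_iff]

theorem pvAnyM_iff (ks : List (String × String)) (k : String × String) :
    pvAnyM ks k = true ↔ ∃ k' ∈ ks, pvMatchK k' k = true := by
  simp [pvAnyM]

theorem pvAnyM_eq_false (ks : List (String × String)) (k : String × String) :
    pvAnyM ks k = false ↔ ∀ k' ∈ ks, pvMatchK k' k = false := by
  simp [pvAnyM]

theorem pvApplyL_fresh (l : List ((String × String) × Int)) (op : (String × String) × Int × Int)
    (h : ∀ e ∈ l, pvMatchK e.1 op.1 = false) :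
    pvApplyL l op = l ++ [(op.1, op.2.1)] := by
  induction l with
  | nil => rfl
  | cons e t ih =>
    have he := h e (by simp)
    have he' : ¬(e.1 = op.1 ∨ e.1 = (op.1.2, op.1.1)) := by
      rw [← pvMatchK_iff, he]; simp
    simp only [pvApplyL]
    rw [if_neg (by tauto), if_neg (by tauto)]
    simp [ih (fun e he' => h e (by simp [he']))]

theorem pvApplyL_hit (l : List ((String × String) × Int)) (op : (String × String) × Int × Int)
    (hcnd : pvCND l) (h : op.1 ∈ l.map Prod.fst) :
    pvApplyL l op = l.map (fun e => if e.1 = op.1 then (e.1, e.2 + op.2.1) else e) := by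
  induction l with
  | nil => simp at h
  | cons e t ih =>
    simp only [List.map_cons, List.mem_cons] at h
    simp only [pvApplyL, List.map_cons]
    rcases List.pairwise_cons.mp hcnd with ⟨hhead, htail⟩
    by_cases h1 : e.1 = op.1
    · rw [if_pos h1, if_pos h1]
      congr 1
      have : ∀ e' ∈ t, e'.1 ≠ op.1 := by
        intro e' he' hc
        have := hhead e'.1 (List.mem_map_of_mem he')
        rw [hc, ← h1] at this
        simp [pvMatchK] at this
      conv_lhs => rw [show t = t.map id by simp]
      exact List.map_congr_left (fun e' he' => by simp [if_neg (this e' he')])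
    · rw [if_neg h1]
      have h2 : e.1 ≠ (op.1.2, op.1.1) := by
        intro hc
        rcases h with h | h
        · exact h1 h.symm
        · have := hhead op.1 h
          rw [hc] at this
          rw [show pvMatchK (op.1.2, op.1.1) op.1 = true from by simp [pvMatchK_iff]] at this
          exact absurd this (by simp)
      rw [if_neg h2, if_neg h1]
      rcases h with h | h
      · exact absurd h.symm h1
      · rw [ih htail h]

theorem pvApplyL_swap (l : List ((String × String) × Int)) (op : (String × String) × Int × Int)
    (hcnd : pvCND l)
    (hno : op.1 ∉ l.map Prod.fst) (h : (op.1.2, op.1.1) ∈ l.map Prod.fst) :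
    pvApplyL l op = l.map (fun e => if e.1 = (op.1.2, op.1.1) then (e.1, e.2 + op.2.2) else e) := by
  induction l with
  | nil => simp at h
  | cons e t ih =>
    simp only [List.map_cons, List.mem_cons, not_or] at h hno
    simp only [pvApplyL, List.map_cons]
    rcases List.pairwise_cons.mp hcnd with ⟨hhead, htail⟩
    by_cases h1 : e.1 = (op.1.2, op.1.1)
    · rw [if_neg (Ne.symm hno.1), if_pos h1, if_pos h1]
      congr 1
      have : ∀ e' ∈ t, e'.1 ≠ (op.1.2, op.1.1) := by
        intro e' he' hc
        have := hhead e'.1 (List.mem_map_of_mem he')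
        rw [hc, ← h1] at this
        simp [pvMatchK] at this
      conv_lhs => rw [show t = t.map id by simp]
      exact List.map_congr_left (fun e' he' => by simp [if_neg (this e' he')])
    · rw [if_neg (Ne.symm hno.1), if_neg h1, if_neg h1]
      rcases h with h | h
      · exact absurd h.symm h1
      · rw [ih htail hno.2 h]

theorem pvKeys_applyL_of_map (l : List ((String × String) × Int)) (f : ((String × String) × Int) → ((String × String) × Int))
    (hf : ∀ e, (f e).1 = e.1) : (l.map f).map Prod.fst = l.map Prod.fst := by
  induction l with
  | nil => rfl
  | cons e t ih => simp [hf, ih]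

-- trichotomy-driven case split helper
theorem pvApplyL_cases (l : List ((String × String) × Int)) (op : (String × String) × Int × Int)
    (hcnd : pvCND l) :
    (op.1 ∈ l.map Prod.fst ∧
       pvApplyL l op = l.map (fun e => if e.1 = op.1 then (e.1, e.2 + op.2.1) else e)) ∨
    (op.1 ∉ l.map Prod.fst ∧ (op.1.2, op.1.1) ∈ l.map Prod.fst ∧
       pvApplyL l op = l.map (fun e => if e.1 = (op.1.2, op.1.1) then (e.1, e.2 + op.2.2) else e)) ∨
    (op.1 ∉ l.map Prod.fst ∧ (op.1.2, op.1.1) ∉ l.map Prod.fst ∧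
       pvApplyL l op = l ++ [(op.1, op.2.1)]) := by
  by_cases h1 : op.1 ∈ l.map Prod.fst
  · exact Or.inl ⟨h1, pvApplyL_hit l op hcnd h1⟩
  · by_cases h2 : (op.1.2, op.1.1) ∈ l.map Prod.fst
    · exact Or.inr (Or.inl ⟨h1, h2, pvApplyL_swap l op hcnd h1 h2⟩)
    · refine Or.inr (Or.inr ⟨h1, h2, pvApplyL_fresh l op ?_⟩)
      intro e he
      have h3 : ¬(e.1 = op.1 ∨ e.1 = (op.1.2, op.1.1)) := by
        rintro (hc | hc)
        · exact h1 (hc ▸ List.mem_map_of_mem he)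
        · exact h2 (hc ▸ List.mem_map_of_mem he)
      rw [← Bool.not_eq_true, pvMatchK_iff]
      tauto

theorem pvKeys_applyL (l : List ((String × String) × Int)) (op : (String × String) × Int × Int)
    (hcnd : pvCND l) :
    (pvApplyL l op).map Prod.fst = l.map Prod.fst ∨
    (pvApplyL l op).map Prod.fst = l.map Prod.fst ++ [op.1] := by
  rcases pvApplyL_cases l op hcnd with ⟨_, h⟩ | ⟨_, _, h⟩ | ⟨_, _, h⟩
  · left; rw [h]; exact pvKeys_applyL_of_map l _ (fun e => by by_cases hc : e.1 = op.1 <;> simp [hc])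
  · left; rw [h]; exact pvKeys_applyL_of_map l _ (fun e => by by_cases hc : e.1 = (op.1.2, op.1.1) <;> simp [hc])
  · right; rw [h]; simp

theorem pvCND_applyL (l : List ((String × String) × Int)) (op : (String × String) × Int × Int)
    (hcnd : pvCND l) : pvCND (pvApplyL l op) := by
  rcases pvApplyL_cases l op hcnd with ⟨_, h⟩ | ⟨_, _, h⟩ | ⟨h1, h2, h⟩
  · rw [pvCND, h, pvKeys_applyL_of_map l _ (fun e => by by_cases hc : e.1 = op.1 <;> simp [hc])]
    exact hcnd
  · rw [pvCND, h, pvKeys_applyL_of_map l _ (fun e => by by_cases hc : e.1 = (op.1.2, op.1.1) <;> simp [hc])]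
    exact hcnd
  · rw [pvCND, h]
    simp only [List.map_append, List.map_cons, List.map_nil]
    rw [List.pairwise_append]
    refine ⟨hcnd, by simp, ?_⟩
    intro k hk k' hk'
    simp at hk'
    subst hk'
    have h3 : ¬(k = op.1 ∨ k = (op.1.2, op.1.1)) := by
      rintro (rfl | rfl)
      · exact h1 hk
      · exact h2 hk
    rw [← Bool.not_eq_true, pvMatchK_iff]
    tauto

theorem pvGK_applyL (l : List ((String × String) × Int)) (op : (String × String) × Int × Int)
    (hcnd : pvCND l) (hg : op.1.1 ≠ op.1.2) (hk : ∀ k ∈ l.map Prod.fst, k.1 ≠ k.2) :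
    ∀ k ∈ (pvApplyL l op).map Prod.fst, k.1 ≠ k.2 := by
  rcases pvKeys_applyL l op hcnd with h | h <;> rw [h]
  · exact hk
  · intro k hkm
    rcases List.mem_append.mp hkm with hm | hm
    · exact hk k hm
    · simp at hm; subst hm; exact hg

def pvFirstKeys : List (String × String) → List ((String × String) × Int × Int) → List (String × String)
  | _, [] => []
  | ks, op :: L => if pvAnyM ks op.1 then pvFirstKeys ks L else op.1 :: pvFirstKeys (op.1 :: ks) L

theorem pvAnyM_cons (k0 : String × String) (ks : List (String × String)) (k : String × String) :
    pvAnyM (k0 :: ks) k = (pvMatchK k0 k || pvAnyM ks k) := by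
  simp [pvAnyM]

theorem pvAnyM_append (ks1 ks2 : List (String × String)) (k : String × String) :
    pvAnyM (ks1 ++ ks2) k = (pvAnyM ks1 k || pvAnyM ks2 k) := by
  simp [pvAnyM]

theorem pvFirstKeys_congr (L : List ((String × String) × Int × Int)) :
    ∀ ks1 ks2, (∀ k, pvAnyM ks1 k = pvAnyM ks2 k) → pvFirstKeys ks1 L = pvFirstKeys ks2 L := by
  induction L with
  | nil => intro ks1 ks2 h; rfl
  | cons op L ih =>
    intro ks1 ks2 h
    simp only [pvFirstKeys, h op.1]
    by_cases hm : pvAnyM ks2 op.1 = true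
    · rw [if_pos hm, if_pos hm, ih ks1 ks2 h]
    · rw [if_neg hm, if_neg hm,
        ih (op.1 :: ks1) (op.1 :: ks2) (fun k => by rw [pvAnyM_cons, pvAnyM_cons, h k])]

theorem pvFirstKeys_not_match (L : List ((String × String) × Int × Int)) :
    ∀ ks k, k ∈ pvFirstKeys ks L → pvAnyM ks k = false := by
  induction L with
  | nil => intro ks k h; simp [pvFirstKeys] at h
  | cons op L ih =>
    intro ks k h
    simp only [pvFirstKeys] at h
    by_cases hm : pvAnyM ks op.1 = true
    · rw [if_pos hm] at h; exact ih ks k h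
    · rw [if_neg hm] at h
      rcases List.mem_cons.mp h with rfl | h
      · exact Bool.eq_false_iff.mpr hm
      · have := ih (op.1 :: ks) k h
        rw [pvAnyM_cons, Bool.or_eq_false_iff] at this
        exact this.2

def pvAmtT (k : String × String) (op : (String × String) × Int × Int) : Int :=
  if op.1.1 = k.1 then op.2.1 else op.2.2
def pvTotal (k : String × String) (L : List ((String × String) × Int × Int)) : Int :=
  (L.map (fun op => if pvMatchK k op.1 then pvAmtT k op else 0)).sum
def pvFoldApply (l : List ((String × String) × Int)) (L : List ((String × String) × Int × Int)) :
    List ((String × String) × Int) := L.foldl pvApplyL l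
def pvGood (L : List ((String × String) × Int × Int)) : Prop := ∀ op ∈ L, op.1.1 ≠ op.1.2

theorem pvTotal_cons (k : String × String) (op : (String × String) × Int × Int) (L : List ((String × String) × Int × Int)) :
    pvTotal k (op :: L) = (if pvMatchK k op.1 then pvAmtT k op else 0) + pvTotal k L := by
  simp [pvTotal]

theorem pvTotal_nil (k : String × String) : pvTotal k [] = 0 := rfl

theorem pvCND_forall (l : List ((String × String) × Int)) (hcnd : pvCND l)
    {k k' : String × String} (h1 : k ∈ l.map Prod.fst) (h2 : k' ∈ l.map Prod.fst) (hne : k ≠ k') :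
    pvMatchK k k' = false := by
  refine List.Pairwise.forall ?_ hcnd h1 h2 hne
  intro a b hab
  rw [pvMatchK_symm]; exact hab

theorem pvPhi (L : List ((String × String) × Int × Int)) :
    ∀ l, pvGood L → pvCND l → (∀ k ∈ l.map Prod.fst, k.1 ≠ k.2) →
    pvFoldApply l L = l.map (fun e => (e.1, e.2 + pvTotal e.1 L)) ++
      (pvFirstKeys (l.map Prod.fst) L).map (fun k => (k, pvTotal k L)) := by
  induction L with
  | nil => intro l _ _ _; simp [pvFoldApply, pvFirstKeys, pvTotal_nil]
  | cons op L ih =>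
    intro l hgood hcnd hgk
    have hg : op.1.1 ≠ op.1.2 := hgood op (by simp)
    have hgoodL : pvGood L := fun o ho => hgood o (by simp [ho])
    have hstep : pvFoldApply l (op :: L) = pvFoldApply (pvApplyL l op) L := rfl
    have hcnd' := pvCND_applyL l op hcnd
    have hgk' := pvGK_applyL l op hcnd hg hgk
    rw [hstep, ih (pvApplyL l op) hgoodL hcnd' hgk']
    rcases pvApplyL_cases l op hcnd with ⟨hm, happ⟩ | ⟨hm1, hm2, happ⟩ | ⟨hm1, hm2, happ⟩
    · -- key (a,b) already present
      have hkeys : (pvApplyL l op).map Prod.fst = l.map Prod.fst := by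
        rw [happ]; exact pvKeys_applyL_of_map l _ (fun e => by by_cases hc : e.1 = op.1 <;> simp [hc])
      rw [hkeys]
      have hany : pvAnyM (l.map Prod.fst) op.1 = true := by
        rw [pvAnyM_iff]; exact ⟨op.1, hm, pvMatchK_self op.1⟩
      have hfk : pvFirstKeys (l.map Prod.fst) (op :: L) = pvFirstKeys (l.map Prod.fst) L := by
        simp [pvFirstKeys, hany]
      rw [hfk, happ, List.map_map]
      congr 1
      · refine List.map_congr_left (fun e he => ?_)
        by_cases hc : e.1 = op.1
        · simp only [Function.comp, hc, if_pos rfl, pvTotal_cons, pvMatchK_self, if_true]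
          simp [pvAmtT]
          ring
        · have hne : pvMatchK e.1 op.1 = false :=
            pvCND_forall l hcnd (List.mem_map_of_mem he) hm hc
          simp [Function.comp, if_neg hc, pvTotal_cons, hne]
      · refine List.map_congr_left (fun k hk => ?_)
        have h1 := pvFirstKeys_not_match L (l.map Prod.fst) k hk
        rw [pvAnyM_eq_false] at h1
        have h2 : pvMatchK k op.1 = false := by rw [pvMatchK_symm]; exact h1 op.1 hm
        rw [pvTotal_cons, h2]; simp
    · -- reversed key (b,a) present
      have hkeys : (pvApplyL l op).map Prod.fst = l.map Prod.fst := by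
        rw [happ]; exact pvKeys_applyL_of_map l _ (fun e => by by_cases hc : e.1 = (op.1.2, op.1.1) <;> simp [hc])
      rw [hkeys]
      have hmatch : pvMatchK (op.1.2, op.1.1) op.1 = true := by simp [pvMatchK_iff]
      have hany : pvAnyM (l.map Prod.fst) op.1 = true := by
        rw [pvAnyM_iff]; exact ⟨(op.1.2, op.1.1), hm2, hmatch⟩
      have hfk : pvFirstKeys (l.map Prod.fst) (op :: L) = pvFirstKeys (l.map Prod.fst) L := by
        simp [pvFirstKeys, hany]
      rw [hfk, happ, List.map_map]
      congr 1
      · refine List.map_congr_left (fun e he => ?_)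
        by_cases hc : e.1 = (op.1.2, op.1.1)
        · simp only [Function.comp, hc, if_pos rfl, pvTotal_cons, hmatch, if_true]
          simp [pvAmtT, hg]
          ring
        · have hne : pvMatchK e.1 op.1 = false := by
            rw [← Bool.not_eq_true, pvMatchK_iff]
            rintro (h | h)
            · exact hm1 (h ▸ List.mem_map_of_mem he)
            · exact hc h
          simp [Function.comp, if_neg hc, pvTotal_cons, hne]
      · refine List.map_congr_left (fun k hk => ?_)
        have h1 := pvFirstKeys_not_match L (l.map Prod.fst) k hk
        rw [pvAnyM_eq_false] at h1
        have h3 := h1 _ hm2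
        have h2 : pvMatchK k op.1 = false := by
          rw [← Bool.not_eq_true, pvMatchK_iff] at h3 ⊢
          rintro (h | h)
          · exact h3 (Or.inr (by simp [h]))
          · exact h3 (Or.inl (by cases op; cases k; simp_all [Prod.ext_iff]))
        rw [pvTotal_cons, h2]; simp
    · -- fresh pair
      have hkeys : (pvApplyL l op).map Prod.fst = l.map Prod.fst ++ [op.1] := by
        rw [happ]; simp
      have hnomatch : ∀ k' ∈ l.map Prod.fst, pvMatchK k' op.1 = false := by
        intro k' hk'
        rw [← Bool.not_eq_true, pvMatchK_iff]
        rintro (h | h)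
        · exact hm1 (h ▸ hk')
        · exact hm2 (h ▸ hk')
      have hany : pvAnyM (l.map Prod.fst) op.1 = false := by
        rw [pvAnyM_eq_false]; exact hnomatch
      have hfk : pvFirstKeys (l.map Prod.fst) (op :: L) =
          op.1 :: pvFirstKeys (op.1 :: l.map Prod.fst) L := by
        simp [pvFirstKeys, hany]
      have hfk2 : pvFirstKeys (l.map Prod.fst ++ [op.1]) L = pvFirstKeys (op.1 :: l.map Prod.fst) L :=
        pvFirstKeys_congr L _ _ (fun k => by
          rw [pvAnyM_append, pvAnyM_cons]
          simp [pvAnyM, Bool.or_comm])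
      rw [hkeys, hfk, hfk2, happ]
      simp only [List.map_append, List.map_cons, List.map_nil]
      rw [List.append_assoc]
      congr 1
      · refine List.map_congr_left (fun e he => ?_)
        have hne := hnomatch e.1 (List.mem_map_of_mem he)
        rw [pvTotal_cons, hne]; simp
      · simp only [List.cons_append, List.nil_append]
        congr 1
        · rw [pvTotal_cons, if_pos (pvMatchK_self op.1)]
          have : pvAmtT op.1 op = op.2.1 := by rw [pvAmtT, if_pos rfl]
          rw [this]
        · refine List.map_congr_left (fun k hk => ?_)
          have h1 := pvFirstKeys_not_match L (op.1 :: l.map Prod.fst) k hk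
          rw [pvAnyM_cons, Bool.or_eq_false_iff] at h1
          have h2 : pvMatchK k op.1 = false := by rw [pvMatchK_symm]; exact h1.1
          rw [pvTotal_cons, h2]; simp

theorem pvCND_keys_nodup (l : List ((String × String) × Int)) (hcnd : pvCND l) :
    (l.map Prod.fst).Nodup := by
  refine List.Pairwise.imp ?_ hcnd
  intro a b hab
  intro hc
  rw [hc, pvMatchK_self] at hab
  simp at hab

theorem pvStep_dict (d : PySem.Dict (String × String) Int) (a b : String) (wab wba : Int)
    (hcnd : pvCND d.items) :
    (if d.contains (a, b) then d.insert (a, b) (d.getD (a, b) 0 + wab)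
     else if d.contains (b, a) then d.insert (b, a) (d.getD (b, a) 0 + wba)
     else d.insert (a, b) wab) = PySem.Dict.mk (pvApplyL d.items ((a, b), wab, wba)) := by
  have hnd : (d.items.map Prod.fst).Nodup := pvCND_keys_nodup _ hcnd
  have hkeys : d.keys = d.items.map Prod.fst := rfl
  by_cases h1 : d.contains (a, b)
  · rw [if_pos h1]
    have hmem : ((a, b) : String × String) ∈ d.items.map Prod.fst := by
      rw [← hkeys]; exact (PySem.Dict.contains_iff_mem_keys d _).mp h1
    apply PySem.Dict.ext
    rw [PySem.Dict.items_insert_of_contains d _ h1]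
    rw [pvApplyL_hit _ _ hcnd hmem]
    refine List.map_congr_left (fun e he => ?_)
    by_cases hc : e.1 = (a, b)
    · have hval : d.getD (a, b) 0 = e.2 := by
        have : ((a, b), e.2) ∈ d.items := by
          rcases e with ⟨k, w⟩; simp at hc; subst hc; exact he
        exact PySem.Dict.getD_of_mem_items d this (hkeys ▸ hnd) 0
      simp [hc, hval]
    · simp [hc]
  · rw [if_neg h1]
    by_cases h2 : d.contains (b, a)
    · rw [if_pos h2]
      have hmem : ((b, a) : String × String) ∈ d.items.map Prod.fst := by
        rw [← hkeys]; exact (PySem.Dict.contains_iff_mem_keys d _).mp h2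
      have hno : ((a, b) : String × String) ∉ d.items.map Prod.fst := by
        intro hc
        exact h1 ((PySem.Dict.contains_iff_mem_keys d _).mpr (hkeys ▸ hc))
      apply PySem.Dict.ext
      rw [PySem.Dict.items_insert_of_contains d _ h2]
      rw [pvApplyL_swap _ _ hcnd hno hmem]
      refine List.map_congr_left (fun e he => ?_)
      by_cases hc : e.1 = (b, a)
      · have hval : d.getD (b, a) 0 = e.2 := by
          have : ((b, a), e.2) ∈ d.items := by
            rcases e with ⟨k, w⟩; simp at hc; subst hc; exact he
          exact PySem.Dict.getD_of_mem_items d this (hkeys ▸ hnd) 0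
        simp [hc, hval]
      · simp [hc]
    · rw [if_neg h2]
      have hno1 : ((a, b) : String × String) ∉ d.items.map Prod.fst := by
        intro hc; exact h1 ((PySem.Dict.contains_iff_mem_keys d _).mpr (hkeys ▸ hc))
      have hno2 : ((b, a) : String × String) ∉ d.items.map Prod.fst := by
        intro hc; exact h2 ((PySem.Dict.contains_iff_mem_keys d _).mpr (hkeys ▸ hc))
      apply PySem.Dict.ext
      rw [PySem.Dict.items_insert_of_not_contains d _ (by simpa using h1)]
      rw [pvApplyL_fresh]
      intro e he
      rw [← Bool.not_eq_true, pvMatchK_iff]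
      rintro (hc | hc)
      · apply hno1
        have hmm := List.mem_map_of_mem (f := Prod.fst) he
        rw [hc] at hmm
        exact hmm
      · apply hno2
        have hmm := List.mem_map_of_mem (f := Prod.fst) he
        rw [hc] at hmm
        exact hmm

def pvInnerOps (n1 : String × Int) (v : List (String × Int)) :
    List ((String × String) × Int × Int) :=
  v.filterMap (fun n2 => if n1.1 = n2.1 then none else some ((n1.1, n2.1), n1.2, n2.2))

def pvOpsA (v : List (String × Int)) : List ((String × String) × Int × Int) :=
  v.flatMap (fun n1 => pvInnerOps n1 v)

theorem pvGood_innerOps (n1 : String × Int) (v : List (String × Int)) : pvGood (pvInnerOps n1 v) := by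
  intro op hop
  simp only [pvInnerOps, List.mem_filterMap] at hop
  rcases hop with ⟨n2, _, hop⟩
  by_cases h : n1.1 = n2.1
  · simp [h] at hop
  · rw [if_neg h] at hop
    injection hop with hop
    subst hop
    simpa using h

theorem pvGood_opsA (v : List (String × Int)) : pvGood (pvOpsA v) := by
  intro op hop
  simp only [pvOpsA, List.mem_flatMap] at hop
  rcases hop with ⟨n1, _, hop⟩
  exact pvGood_innerOps n1 v op hop

theorem pvInv_foldApply (L : List ((String × String) × Int × Int)) :
    ∀ l, pvGood L → pvCND l → (∀ k ∈ l.map Prod.fst, k.1 ≠ k.2) →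
      pvCND (pvFoldApply l L) ∧ (∀ k ∈ (pvFoldApply l L).map Prod.fst, k.1 ≠ k.2) := by
  induction L with
  | nil => intro l _ h1 h2; exact ⟨h1, h2⟩
  | cons op L ih =>
    intro l hgood h1 h2
    have hg : op.1.1 ≠ op.1.2 := hgood op (by simp)
    exact ih (pvApplyL l op) (fun o ho => hgood o (by simp [ho]))
      (pvCND_applyL l op h1) (pvGK_applyL l op h1 hg h2)

theorem pvFoldApply_append (l : List ((String × String) × Int)) (L1 L2 : List ((String × String) × Int × Int)) :
    pvFoldApply l (L1 ++ L2) = pvFoldApply (pvFoldApply l L1) L2 := by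
  simp [pvFoldApply]

theorem pvA_inner (n1 : String × Int) (v : List (String × Int)) :
    ∀ (d : PySem.Dict (String × String) Int), pvCND d.items →
      (∀ k ∈ d.items.map Prod.fst, k.1 ≠ k.2) →
    v.foldl (fun rep n2 =>
        if n1.1 ≠ n2.1 then
          if rep.contains (n1.1, n2.1) then rep.insert (n1.1, n2.1) (rep.getD (n1.1, n2.1) 0 + n1.2)
          else if rep.contains (n2.1, n1.1) then rep.insert (n2.1, n1.1) (rep.getD (n2.1, n1.1) 0 + n2.2)
          else rep.insert (n1.1, n2.1) n1.2
        else rep) d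
      = PySem.Dict.mk (pvFoldApply d.items (pvInnerOps n1 v)) := by
  induction v with
  | nil =>
    intro d _ _
    exact PySem.Dict.ext rfl
  | cons n2 v ih =>
    intro d h1 h2
    simp only [List.foldl_cons]
    by_cases h : n1.1 = n2.1
    · rw [if_neg (by simpa using h)]
      rw [ih d h1 h2]
      congr 1
      simp [pvInnerOps, h]
    · rw [if_pos (by simpa using h)]
      have hstep := pvStep_dict d n1.1 n2.1 n1.2 n2.2 h1
      rw [hstep]
      have hops : pvInnerOps n1 (n2 :: v) = ((n1.1, n2.1), n1.2, n2.2) :: pvInnerOps n1 v := by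
        simp [pvInnerOps, h]
      have hg : (((n1.1, n2.1), n1.2, n2.2) : (String × String) × Int × Int).1.1 ≠ ((n1.1, n2.1), n1.2, n2.2).1.2 := by simpa using h
      have h1' : pvCND (pvApplyL d.items ((n1.1, n2.1), n1.2, n2.2)) := pvCND_applyL _ _ h1
      have h2' := pvGK_applyL d.items ((n1.1, n2.1), n1.2, n2.2) h1 hg h2
      rw [ih (PySem.Dict.mk (pvApplyL d.items ((n1.1, n2.1), n1.2, n2.2))) h1' h2']
      rw [hops]
      rfl

theorem pvA_outer (v : List (String × Int)) :
    ∀ (u : List (String × Int)) (d : PySem.Dict (String × String) Int), pvCND d.items →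
      (∀ k ∈ d.items.map Prod.fst, k.1 ≠ k.2) →
    u.foldl (fun rep n1 => v.foldl (fun rep n2 =>
        if n1.1 ≠ n2.1 then
          if rep.contains (n1.1, n2.1) then rep.insert (n1.1, n2.1) (rep.getD (n1.1, n2.1) 0 + n1.2)
          else if rep.contains (n2.1, n1.1) then rep.insert (n2.1, n1.1) (rep.getD (n2.1, n1.1) 0 + n2.2)
          else rep.insert (n1.1, n2.1) n1.2
        else rep) rep) d
      = PySem.Dict.mk (pvFoldApply d.items (u.flatMap (fun n1 => pvInnerOps n1 v))) := by
  intro u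
  induction u with
  | nil => intro d _ _; exact PySem.Dict.ext rfl
  | cons n1 u ih =>
    intro d h1 h2
    simp only [List.foldl_cons]
    rw [pvA_inner n1 v d h1 h2]
    have hinv := pvInv_foldApply (pvInnerOps n1 v) d.items (pvGood_innerOps n1 v) h1 h2
    rw [ih (PySem.Dict.mk (pvFoldApply d.items (pvInnerOps n1 v))) hinv.1 hinv.2]
    congr 1
    simp only [List.flatMap_cons, pvFoldApply_append]

def pvRowOps (agg : PySem.Dict String (Int × Int)) (a : String) (r : List String) :
    List ((String × String) × Int × Int) :=
  r.map (fun b => ((a, b), 2 * (agg.getD a (0, 0)).1 * (agg.getD b (0, 0)).2,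
    2 * (agg.getD b (0, 0)).1 * (agg.getD a (0, 0)).2))

def pvOpsB (agg : PySem.Dict String (Int × Int)) : List String → List ((String × String) × Int × Int)
  | [] => []
  | a :: r => pvRowOps agg a r ++ pvOpsB agg r

theorem pvCND_foldApply (L : List ((String × String) × Int × Int)) :
    ∀ l, pvCND l → pvCND (pvFoldApply l L) := by
  induction L with
  | nil => intro l h; exact h
  | cons op L ih => intro l h; exact ih (pvApplyL l op) (pvCND_applyL l op h)

theorem pvB_row (agg : PySem.Dict String (Int × Int)) (a : String) :
    ∀ (r : List String) (d : PySem.Dict (String × String) Int), pvCND d.items →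
    r.foldl (fun rep b =>
      if rep.contains (a, b) then rep.insert (a, b) (rep.getD (a, b) 0 + 2 * (agg.getD a (0, 0)).1 * (agg.getD b (0, 0)).2)
      else if rep.contains (b, a) then rep.insert (b, a) (rep.getD (b, a) 0 + 2 * (agg.getD b (0, 0)).1 * (agg.getD a (0, 0)).2)
      else rep.insert (a, b) (2 * (agg.getD a (0, 0)).1 * (agg.getD b (0, 0)).2)) d
    = PySem.Dict.mk (pvFoldApply d.items (pvRowOps agg a r)) := by
  intro r
  induction r with
  | nil => intro d _; exact PySem.Dict.ext rfl
  | cons b r ih =>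
    intro d h1
    simp only [List.foldl_cons]
    rw [pvStep_dict d a b _ _ h1]
    rw [ih _ (pvCND_applyL d.items _ h1)]
    rfl

theorem pvB_loop (agg : PySem.Dict String (Int × Int)) :
    ∀ (os : List String) (d : PySem.Dict (String × String) Int), pvCND d.items →
    pvPairLoop agg os d = PySem.Dict.mk (pvFoldApply d.items (pvOpsB agg os)) := by
  intro os
  induction os with
  | nil => intro d _; exact PySem.Dict.ext rfl
  | cons a rest ih =>
    intro d h1
    simp only [pvPairLoop]
    rw [pvB_row agg a rest d h1]
    rw [ih (PySem.Dict.mk (pvFoldApply d.items (pvRowOps agg a rest))) (pvCND_foldApply (pvRowOps agg a rest) d.items h1)]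
    congr 1
    simp only [pvOpsB, pvFoldApply_append]

def pvW (a : String) (v : List (String × Int)) : Int :=
  ((v.filter (fun n => n.1 = a)).map Prod.snd).sum
def pvC (b : String) (v : List (String × Int)) : Int := ((v.map Prod.fst).count b : Int)

theorem pvW_append (a : String) (v : List (String × Int)) (n : String × Int) :
    pvW a (v ++ [n]) = pvW a v + (if n.1 = a then n.2 else 0) := by
  simp only [pvW, List.filter_append]
  by_cases h : n.1 = a <;> simp [h]

theorem pvC_append (b : String) (v : List (String × Int)) (n : String × Int) :
    pvC b (v ++ [n]) = pvC b v + (if n.1 = b then 1 else 0) := by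
  simp only [pvC, List.map_append, List.count_append]
  by_cases h : n.1 = b <;> simp [h]

theorem pvW_of_not_mem (a : String) (v : List (String × Int)) (h : a ∉ v.map Prod.fst) :
    pvW a v = 0 := by
  have : v.filter (fun n => n.1 = a) = [] := by
    rw [List.filter_eq_nil_iff]
    intro n hn
    simp only [decide_eq_true_eq]
    intro hc
    exact h (hc ▸ List.mem_map_of_mem hn)
  simp [pvW, this]

theorem pvC_of_not_mem (b : String) (v : List (String × Int)) (h : b ∉ v.map Prod.fst) :
    pvC b v = 0 := by
  simp [pvC, List.count_eq_zero.mpr h]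

theorem pvAgg_append (v : List (String × Int)) (n : String × Int) : pvAgg (v ++ [n]) =
    (if (pvAgg v).1.contains n.1 then
      ((pvAgg v).1.insert n.1 (((pvAgg v).1.getD n.1 (0, 0)).1 + n.2, ((pvAgg v).1.getD n.1 (0, 0)).2 + 1), (pvAgg v).2)
    else ((pvAgg v).1.insert n.1 (n.2, 1), (pvAgg v).2 ++ [n.1])) := by
  unfold pvAgg
  rw [List.foldl_append]
  rfl

theorem pvAgg_contains (v : List (String × Int)) (x : String) :
    (pvAgg v).1.contains x = true ↔ x ∈ v.map Prod.fst := by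
  induction v using List.reverseRecOn with
  | nil => simp [pvAgg, PySem.Dict.contains_empty]
  | append_singleton v n ih =>
    rw [pvAgg_append]
    by_cases h : (pvAgg v).1.contains n.1 = true
    · simp only [h, if_true, PySem.Dict.contains_insert, List.map_append, List.mem_append]
      constructor
      · intro hx
        rcases Bool.or_eq_true_iff.mp hx with hx | hx
        · left; simp at hx; subst hx; exact ih.mp h
        · left; exact ih.mp hx
      · intro hx
        rcases hx with hx | hx
        · simp [ih.mpr hx]
        · simp at hx; simp [hx]
    · rw [Bool.not_eq_true] at h
      simp only [h, Bool.false_eq_true, if_false, PySem.Dict.contains_insert, List.map_append, List.mem_append]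
      constructor
      · intro hx
        rcases Bool.or_eq_true_iff.mp hx with hx | hx
        · right; simp at hx; simp [hx]
        · left; exact ih.mp hx
      · intro hx
        rcases hx with hx | hx
        · simp [ih.mpr hx]
        · simp at hx; simp [hx]

theorem pvAgg_getD (v : List (String × Int)) (x : String) :
    (pvAgg v).1.getD x (0, 0) = (pvW x v, pvC x v) := by
  induction v using List.reverseRecOn with
  | nil => simp [pvAgg, pvW, pvC, PySem.Dict.getD_empty]
  | append_singleton v n ih =>
    rw [pvAgg_append, pvW_append, pvC_append]
    by_cases h : (pvAgg v).1.contains n.1 = true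
    · simp only [h, if_true]
      rw [PySem.Dict.getD_insert]
      by_cases hx : x = n.1
      · subst hx
        rw [if_pos rfl, ih]
        simp
      · rw [if_neg hx, ih, if_neg (fun hc => hx hc.symm), if_neg (fun hc => hx hc.symm)]
        simp
    · rw [Bool.not_eq_true] at h
      simp only [h, Bool.false_eq_true, if_false]
      rw [PySem.Dict.getD_insert]
      have hno : n.1 ∉ v.map Prod.fst := fun hc => by
        rw [← pvAgg_contains] at hc; rw [hc] at h; simp at h
      by_cases hx : x = n.1
      · subst hx
        rw [if_pos rfl, pvW_of_not_mem _ _ hno, pvC_of_not_mem _ _ hno]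
        simp
      · rw [if_neg hx, ih, if_neg (fun hc => hx hc.symm), if_neg (fun hc => hx hc.symm)]
        simp

theorem pvAgg_order (v : List (String × Int)) :
    (pvAgg v).2 = PySem.Set.ofList (v.map Prod.fst) := by
  induction v using List.reverseRecOn with
  | nil => simp [pvAgg, PySem.Set.ofList_nil]
  | append_singleton v n ih =>
    rw [pvAgg_append]
    simp only [List.map_append, List.map_cons, List.map_nil]
    rw [PySem.Set.ofList_append_singleton, PySem.Set.add_eq_ite]
    by_cases h : (pvAgg v).1.contains n.1 = true
    · have hmem : n.1 ∈ v.map Prod.fst := (pvAgg_contains v n.1).mp h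
      rw [if_pos ((PySem.Set.mem_ofList _ _).mpr hmem)]
      simp [h, ih]
    · rw [Bool.not_eq_true] at h
      have hno : n.1 ∉ v.map Prod.fst := fun hc => by
        rw [← pvAgg_contains] at hc; rw [hc] at h; simp at h
      rw [if_neg (fun hc => hno ((PySem.Set.mem_ofList _ _).mp hc))]
      simp [h, ih]

theorem pvTotal_append (k : String × String) (L1 L2 : List ((String × String) × Int × Int)) :
    pvTotal k (L1 ++ L2) = pvTotal k L1 + pvTotal k L2 := by
  simp [pvTotal]

theorem pvW_cons (a : String) (n : String × Int) (v : List (String × Int)) :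
    pvW a (n :: v) = (if n.1 = a then n.2 else 0) + pvW a v := by
  simp only [pvW, List.filter_cons]
  by_cases h : n.1 = a <;> simp [h]

theorem pvC_cons (b : String) (n : String × Int) (v : List (String × Int)) :
    pvC b (n :: v) = (if n.1 = b then 1 else 0) + pvC b v := by
  simp only [pvC, List.map_cons, List.count_cons]
  by_cases h : n.1 = b <;> simp [h] <;> push_cast <;> ring

theorem pvTotal_innerOps (a b : String) (hab : a ≠ b) (n1 : String × Int) (v : List (String × Int)) :
    pvTotal (a, b) (pvInnerOps n1 v) =
      if n1.1 = a then n1.2 * pvC b v else if n1.1 = b then pvW a v else 0 := by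
  induction v with
  | nil => simp [pvInnerOps, pvTotal_nil, pvW, pvC]
  | cons n2 v ih =>
    rw [pvW_cons, pvC_cons]
    by_cases h : n1.1 = n2.1
    · have he : pvInnerOps n1 (n2 :: v) = pvInnerOps n1 v := by simp [pvInnerOps, h]
      rw [he, ih]
      by_cases h1 : n1.1 = a <;> by_cases h2 : n1.1 = b <;>
        simp_all <;> ring
    · have he : pvInnerOps n1 (n2 :: v) = ((n1.1, n2.1), n1.2, n2.2) :: pvInnerOps n1 v := by
        simp [pvInnerOps, h]
      rw [he, pvTotal_cons, ih]
      by_cases h1 : n1.1 = a <;> by_cases h2 : n2.1 = b <;> by_cases h3 : n1.1 = b <;>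
        by_cases h4 : n2.1 = a <;>
        simp_all [pvMatchK_iff, pvAmtT, Prod.ext_iff] <;> (try ring) <;>
        (intro hx
         first
         | exact absurd hx.symm (by assumption)
         | exact absurd hx (by assumption)
         | simp_all [eq_comm])

theorem pvTotal_flatMapInner (a b : String) (hab : a ≠ b) (v : List (String × Int)) :
    ∀ u : List (String × Int),
      pvTotal (a, b) (u.flatMap (fun n1 => pvInnerOps n1 v)) =
        pvW a u * pvC b v + pvC b u * pvW a v := by
  intro u
  induction u with
  | nil => simp [pvTotal_nil, pvW, pvC]
  | cons n1 u ih =>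
    simp only [List.flatMap_cons]
    rw [pvTotal_append, ih, pvTotal_innerOps a b hab, pvW_cons, pvC_cons]
    by_cases h1 : n1.1 = a <;> by_cases h2 : n1.1 = b <;> simp_all <;> ring

theorem pvTotal_opsA (a b : String) (hab : a ≠ b) (v : List (String × Int)) :
    pvTotal (a, b) (pvOpsA v) = 2 * (pvW a v * pvC b v) := by
  rw [pvOpsA, pvTotal_flatMapInner a b hab v v]
  ring

theorem pvTotal_rowOps (v : List (String × Int)) (a b x : String) (hab : a ≠ b) :
    ∀ r : List String, x ∉ r → r.Nodup →
    pvTotal (a, b) (pvRowOps (pvAgg v).1 x r) =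
      (if x = a ∧ b ∈ r then 2 * (pvW a v * pvC b v)
       else if x = b ∧ a ∈ r then 2 * (pvW a v * pvC b v) else 0) := by
  intro r
  induction r with
  | nil => intro _ _; simp [pvRowOps, pvTotal_nil]
  | cons y r ih =>
    intro hx hnd
    have hxy : x ≠ y := by intro hc; exact hx (hc ▸ List.mem_cons_self)
    have hxr : x ∉ r := fun hc => hx (List.mem_cons_of_mem _ hc)
    have hyr : y ∉ r := (List.nodup_cons.mp hnd).1
    have hndr : r.Nodup := (List.nodup_cons.mp hnd).2
    have hrow : pvRowOps (pvAgg v).1 x (y :: r) =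
        ((x, y), 2 * ((pvAgg v).1.getD x (0, 0)).1 * ((pvAgg v).1.getD y (0, 0)).2,
          2 * ((pvAgg v).1.getD y (0, 0)).1 * ((pvAgg v).1.getD x (0, 0)).2) :: pvRowOps (pvAgg v).1 x r := rfl
    rw [hrow, pvTotal_cons, ih hxr hndr]
    rw [pvAgg_getD, pvAgg_getD]
    by_cases h1 : x = a <;> by_cases h2 : y = b <;> by_cases h3 : x = b <;> by_cases h4 : y = a <;>
      simp_all [pvMatchK_iff, pvAmtT, Prod.ext_iff] <;> (try ring) <;>
      (try (intro hx2
            first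
            | exact absurd hx2.symm (by assumption)
            | exact absurd hx2 (by assumption)
            | simp_all [eq_comm])) <;>
      simp_all [eq_comm] <;> (try ring)

theorem pvTotal_opsB (v : List (String × Int)) (a b : String) (hab : a ≠ b) :
    ∀ os : List String, os.Nodup →
    pvTotal (a, b) (pvOpsB (pvAgg v).1 os) =
      (if a ∈ os ∧ b ∈ os then 2 * (pvW a v * pvC b v) else 0) := by
  intro os
  induction os with
  | nil => simp [pvOpsB, pvTotal_nil]
  | cons x r ih =>
    intro hnd
    have hxr : x ∉ r := (List.nodup_cons.mp hnd).1
    have hndr : r.Nodup := (List.nodup_cons.mp hnd).2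
    simp only [pvOpsB]
    rw [pvTotal_append, ih hndr, pvTotal_rowOps v a b x hab r hxr hndr]
    by_cases h1 : x = a <;> by_cases h2 : x = b <;> by_cases h3 : a ∈ r <;> by_cases h4 : b ∈ r <;>
      simp_all [eq_comm] <;> (try ring)

theorem pvTotal_eq (v : List (String × Int)) (a b : String) (hab : a ≠ b) :
    pvTotal (a, b) (pvOpsA v) = pvTotal (a, b) (pvOpsB (pvAgg v).1 (pvAgg v).2) := by
  rw [pvTotal_opsA a b hab v, pvAgg_order,
    pvTotal_opsB v a b hab _ (PySem.Set.nodup_ofList _)]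
  by_cases h1 : a ∈ v.map Prod.fst <;> by_cases h2 : b ∈ v.map Prod.fst
  · rw [if_pos ⟨(PySem.Set.mem_ofList _ _).mpr h1, (PySem.Set.mem_ofList _ _).mpr h2⟩]
  · rw [if_neg (fun hc => h2 ((PySem.Set.mem_ofList _ _).mp hc.2))]
    rw [pvC_of_not_mem b v h2]; ring
  · rw [if_neg (fun hc => h1 ((PySem.Set.mem_ofList _ _).mp hc.1))]
    rw [pvW_of_not_mem a v h1]; ring
  · rw [if_neg (fun hc => h1 ((PySem.Set.mem_ofList _ _).mp hc.1))]
    rw [pvW_of_not_mem a v h1]; ring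

theorem pvMatchK_trans {k1 k2 k3 : String × String} (h1 : pvMatchK k1 k2 = true)
    (h2 : pvMatchK k2 k3 = true) : pvMatchK k1 k3 = true := by
  rw [pvMatchK_iff] at h1 h2 ⊢
  rcases h1 with h1 | h1 <;> rcases h2 with h2 | h2 <;>
    (try subst h1) <;> (try subst h2) <;> simp_all

theorem pvFilter_filter_anyM (xs : List (String × String)) (ks : List (String × String))
    (k0 : String × String) (hk : pvAnyM ks k0 = true) :
    xs.filter (fun k => !pvAnyM ks k) =
      (xs.filter (fun k => !pvAnyM [k0] k)).filter (fun k => !pvAnyM ks k) := by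
  rw [List.filter_filter]
  refine List.filter_congr (fun k _ => ?_)
  by_cases h : pvAnyM ks k = true
  · simp [h]
  · have h0 : pvAnyM [k0] k = false := by
      rw [pvAnyM_eq_false]
      intro k' hk'
      have hkk : k' = k0 := by simpa using hk'
      rw [hkk]
      rw [← Bool.not_eq_true]
      intro hm
      rcases (pvAnyM_iff ks k0).mp hk with ⟨k2, hk2, hm2⟩
      have hfalse : pvAnyM ks k = false := Bool.eq_false_iff.mpr h
      have := (pvAnyM_eq_false ks k).mp hfalse k2 hk2
      rw [pvMatchK_trans hm2 hm] at this
      simp at this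
    simp [h0, h]

theorem pvFirstKeys_filter (L : List ((String × String) × Int × Int)) :
    ∀ ks, pvFirstKeys ks L = (pvFirstKeys [] L).filter (fun k => !pvAnyM ks k) := by
  induction L with
  | nil => intro ks; simp [pvFirstKeys]
  | cons op L ih =>
    intro ks
    have hnil : pvAnyM [] op.1 = false := by simp [pvAnyM]
    by_cases hm : pvAnyM ks op.1 = true
    · rw [show pvFirstKeys ks (op :: L) = pvFirstKeys ks L from by simp [pvFirstKeys, hm]]
      rw [show pvFirstKeys [] (op :: L) = op.1 :: pvFirstKeys [op.1] L from by simp [pvFirstKeys, hnil]]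
      rw [List.filter_cons]
      rw [if_neg (by simp [hm])]
      rw [ih ks, ih [op.1]]
      exact pvFilter_filter_anyM _ ks op.1 hm
    · rw [Bool.not_eq_true] at hm
      rw [show pvFirstKeys ks (op :: L) = op.1 :: pvFirstKeys (op.1 :: ks) L from by simp [pvFirstKeys, hm]]
      rw [show pvFirstKeys [] (op :: L) = op.1 :: pvFirstKeys [op.1] L from by simp [pvFirstKeys, hnil]]
      rw [List.filter_cons, if_pos (by simp [hm])]
      congr 1
      rw [ih (op.1 :: ks), ih [op.1], List.filter_filter]
      refine List.filter_congr (fun k _ => ?_)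
      rw [pvAnyM_cons]
      simp [pvAnyM, Bool.and_comm]

theorem pvFirstKeys_filterOps (L : List ((String × String) × Int × Int)) :
    ∀ ks, pvFirstKeys [] (L.filter (fun op => !pvAnyM ks op.1)) =
      (pvFirstKeys [] L).filter (fun k => !pvAnyM ks k) := by
  induction L with
  | nil => intro ks; simp [pvFirstKeys]
  | cons op L ih =>
    intro ks
    have hnil : pvAnyM [] op.1 = false := by simp [pvAnyM]
    have hf : pvFirstKeys [] (op :: L) = op.1 :: pvFirstKeys [op.1] L := by
      simp [pvFirstKeys, hnil]
    by_cases hm : pvAnyM ks op.1 = true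
    · rw [List.filter_cons, if_neg (by simp [hm]), ih ks, hf, List.filter_cons,
        if_neg (by simp [hm]), pvFirstKeys_filter L [op.1]]
      exact pvFilter_filter_anyM _ ks op.1 hm
    · rw [List.filter_cons, if_pos (by simp [hm])]
      have hf2 : pvFirstKeys [] (op :: L.filter (fun op => !pvAnyM ks op.1)) =
          op.1 :: pvFirstKeys [op.1] (L.filter (fun op => !pvAnyM ks op.1)) := by
        simp [pvFirstKeys, hnil]
      rw [hf2, hf, List.filter_cons, if_pos (by simp [hm])]
      congr 1
      rw [pvFirstKeys_filter (L.filter (fun op => !pvAnyM ks op.1)) [op.1], ih ks,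
        pvFirstKeys_filter L [op.1], List.filter_filter, List.filter_filter]
      exact List.filter_congr (fun k _ => by rw [Bool.and_comm])

theorem pvFirstKeys_append (L1 L2 : List ((String × String) × Int × Int)) :
    ∀ ks, pvFirstKeys ks (L1 ++ L2) =
      pvFirstKeys ks L1 ++ pvFirstKeys (pvFirstKeys ks L1 ++ ks) L2 := by
  induction L1 with
  | nil => intro ks; simp [pvFirstKeys]
  | cons op L1 ih =>
    intro ks
    by_cases hm : pvAnyM ks op.1 = true
    · simp only [List.cons_append]
      rw [show pvFirstKeys ks (op :: (L1 ++ L2)) = pvFirstKeys ks (L1 ++ L2) from by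
        simp [pvFirstKeys, hm]]
      rw [show pvFirstKeys ks (op :: L1) = pvFirstKeys ks L1 from by simp [pvFirstKeys, hm]]
      exact ih ks
    · rw [Bool.not_eq_true] at hm
      simp only [List.cons_append]
      rw [show pvFirstKeys ks (op :: (L1 ++ L2)) = op.1 :: pvFirstKeys (op.1 :: ks) (L1 ++ L2) from by
        simp [pvFirstKeys, hm]]
      rw [show pvFirstKeys ks (op :: L1) = op.1 :: pvFirstKeys (op.1 :: ks) L1 from by
        simp [pvFirstKeys, hm]]
      rw [ih (op.1 :: ks)]
      simp only [List.cons_append]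
      rw [pvFirstKeys_congr L2 (pvFirstKeys (op.1 :: ks) L1 ++ (op.1 :: ks))
          (op.1 :: (pvFirstKeys (op.1 :: ks) L1 ++ ks)) (fun k => by
        simp [pvAnyM_append, pvAnyM_cons, Bool.or_left_comm, Bool.or_comm, Bool.or_assoc])]

def pvTpKeys : List String → List (String × String)
  | [] => []
  | a :: r => r.map (fun b => (a, b)) ++ pvTpKeys r

theorem pvTpKeys_mem (S : List String) (hnd : S.Nodup) (k : String × String)
    (hk : k ∈ pvTpKeys S) : k.1 ∈ S ∧ k.2 ∈ S ∧ k.1 ≠ k.2 := by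
  induction S with
  | nil => simp [pvTpKeys] at hk
  | cons x S ih =>
    rcases List.nodup_cons.mp hnd with ⟨hx, hndS⟩
    simp only [pvTpKeys, List.mem_append, List.mem_map] at hk
    rcases hk with ⟨b, hb, rfl⟩ | hk
    · exact ⟨by simp, by simp [hb], fun hc => hx (by simp at hc; rw [hc]; exact hb)⟩
    · rcases ih hndS hk with ⟨h1, h2, h3⟩
      exact ⟨List.mem_cons_of_mem _ h1, List.mem_cons_of_mem _ h2, h3⟩

theorem pvFK_rowOps (agg : PySem.Dict String (Int × Int)) (x : String) :
    ∀ (r : List String) (ks : List (String × String)), x ∉ r → r.Nodup →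
      (∀ y ∈ r, pvAnyM ks (x, y) = false) →
      pvFirstKeys ks (pvRowOps agg x r) = r.map (fun y => (x, y)) := by
  intro r
  induction r with
  | nil => intro ks _ _ _; simp [pvRowOps, pvFirstKeys]
  | cons y r ih =>
    intro ks hx hnd hks
    have hxy : x ≠ y := fun hc => hx (hc ▸ List.mem_cons_self)
    have hxr : x ∉ r := fun hc => hx (List.mem_cons_of_mem _ hc)
    have hyr : y ∉ r := (List.nodup_cons.mp hnd).1
    have hrow : pvRowOps agg x (y :: r) =
        ((x, y), 2 * ((agg.getD x (0, 0)).1) * ((agg.getD y (0, 0)).2),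
          2 * ((agg.getD y (0, 0)).1) * ((agg.getD x (0, 0)).2)) :: pvRowOps agg x r := rfl
    rw [hrow]
    rw [show pvFirstKeys ks (_ :: pvRowOps agg x r) =
        (x, y) :: pvFirstKeys ((x, y) :: ks) (pvRowOps agg x r) from by
      simp [pvFirstKeys, hks y List.mem_cons_self]]
    simp only [List.map_cons]
    congr 1
    refine ih ((x, y) :: ks) hxr (List.nodup_cons.mp hnd).2 (fun y' hy' => ?_)
    rw [pvAnyM_cons, hks y' (List.mem_cons_of_mem _ hy')]
    rw [show pvMatchK (x, y) (x, y') = false from by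
      rw [← Bool.not_eq_true, pvMatchK_iff]
      rintro (hc | hc) <;> simp [Prod.ext_iff] at hc
      · exact hyr (hc ▸ hy')
      · exact hxy hc.2.symm]
    rfl

theorem pvFK_opsB (agg : PySem.Dict String (Int × Int)) :
    ∀ os : List String, os.Nodup → pvFirstKeys [] (pvOpsB agg os) = pvTpKeys os := by
  intro os
  induction os with
  | nil => simp [pvOpsB, pvFirstKeys, pvTpKeys]
  | cons x r ih =>
    intro hnd
    rcases List.nodup_cons.mp hnd with ⟨hx, hndr⟩
    have hrow : pvFirstKeys [] (pvRowOps agg x r) = r.map (fun y => (x, y)) :=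
      pvFK_rowOps agg x r [] hx hndr (fun y _ => by simp [pvAnyM])
    rw [show pvOpsB agg (x :: r) = pvRowOps agg x r ++ pvOpsB agg r from rfl]
    rw [pvFirstKeys_append, List.append_nil, hrow]
    rw [pvFirstKeys_filter, ih hndr]
    rw [pvTpKeys]
    congr 1
    rw [List.filter_eq_self]
    intro k hk
    rcases pvTpKeys_mem r hndr k hk with ⟨h1, h2, h3⟩
    simp only [Bool.not_eq_eq_eq_not, Bool.not_true]
    rw [pvAnyM_eq_false]
    intro k' hk'
    rcases List.mem_map.mp hk' with ⟨y, hy, rfl⟩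
    rw [← Bool.not_eq_true, pvMatchK_iff]
    rintro (hc | hc)
    · have hcx : x = k.1 := congrArg Prod.fst hc
      exact hx (by rw [hcx]; exact h1)
    · have hcx : x = k.2 := congrArg Prod.fst hc
      exact hx (by rw [hcx]; exact h2)

theorem pvFK_inner (n : String × Int) :
    ∀ (w : List (String × Int)) (ks : List (String × String)),
      pvFirstKeys ks (pvInnerOps n w) =
        ((PySem.Set.ofList (w.map Prod.fst)).filter
            (fun y => !(y == n.1) && !pvAnyM ks (n.1, y))).map (fun y => (n.1, y)) := by
  intro w
  induction w with
  | nil => intro ks; simp [pvInnerOps, pvFirstKeys, PySem.Set.ofList_nil]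
  | cons m w ih =>
    intro ks
    have hof : PySem.Set.ofList ((m :: w).map Prod.fst) =
        m.1 :: PySem.Set.discard (PySem.Set.ofList (w.map Prod.fst)) m.1 := by
      simp [PySem.Set.ofList_cons]
    have hdis : PySem.Set.discard (PySem.Set.ofList (w.map Prod.fst)) m.1 =
        (PySem.Set.ofList (w.map Prod.fst)).filter (fun y => !(y == m.1)) := rfl
    by_cases h : n.1 = m.1
    · have hinner : pvInnerOps n (m :: w) = pvInnerOps n w := by simp [pvInnerOps, h]
      rw [hinner, ih ks, hof, hdis]
      rw [List.filter_cons]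
      rw [if_neg (by simp [h])]
      rw [List.filter_filter]
      congr 1
      refine List.filter_congr (fun y _ => ?_)
      by_cases hy : y = m.1 <;> simp [hy, h] <;> simp [← h, hy]
    · have hinner : pvInnerOps n (m :: w) =
          ((n.1, m.1), n.2, m.2) :: pvInnerOps n w := by simp [pvInnerOps, h]
      rw [hinner, hof, hdis]
      by_cases ha : pvAnyM ks (n.1, m.1) = true
      · rw [show pvFirstKeys ks (((n.1, m.1), n.2, m.2) :: pvInnerOps n w) =
            pvFirstKeys ks (pvInnerOps n w) from by simp [pvFirstKeys, ha]]
        rw [ih ks]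
        rw [List.filter_cons, if_neg (by simp [ha]), List.filter_filter]
        congr 1
        refine List.filter_congr (fun y _ => ?_)
        by_cases hy : y = m.1
        · subst hy; simp [ha]
        · simp [hy]
      · rw [Bool.not_eq_true] at ha
        rw [show pvFirstKeys ks (((n.1, m.1), n.2, m.2) :: pvInnerOps n w) =
            (n.1, m.1) :: pvFirstKeys ((n.1, m.1) :: ks) (pvInnerOps n w) from by
          simp [pvFirstKeys, ha]]
        rw [ih ((n.1, m.1) :: ks)]
        rw [List.filter_cons, if_pos (by simp [ha, Ne.symm h])]
        simp only [List.map_cons]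
        congr 1
        rw [List.filter_filter]
        congr 1
        refine List.filter_congr (fun y _ => ?_)
        rw [pvAnyM_cons]
        have hmk : pvMatchK (n.1, m.1) (n.1, y) = decide (y = m.1) := by
          by_cases hy : y = m.1
          · simp [hy, pvMatchK_self]
          · simp [hy]
            rw [← Bool.not_eq_true, pvMatchK_iff]
            rintro (hc | hc) <;> simp [Prod.ext_iff] at hc
            · exact hy hc.symm
            · exact h hc.2.symm
        rw [hmk]
        by_cases hy : y = m.1 <;> simp [hy]

theorem pvTpKeys_filter (c : String) :
    ∀ S : List String,
      (pvTpKeys S).filter (fun k => !(k.1 == c) && !(k.2 == c)) =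
        pvTpKeys (S.filter (fun y => !(y == c))) := by
  intro S
  induction S with
  | nil => simp [pvTpKeys]
  | cons y S ih =>
    simp only [pvTpKeys, List.filter_append]
    rw [List.filter_cons]
    by_cases hy : y = c
    · rw [if_neg (by simp [hy])]
      have hmap : (S.map (fun b => (y, b))).filter (fun k => !(k.1 == c) && !(k.2 == c)) = [] := by
        rw [List.filter_eq_nil_iff]
        intro k hk
        rcases List.mem_map.mp hk with ⟨b, _, rfl⟩
        simp [hy]
      rw [hmap, ih]
      simp
    · rw [if_pos (by simp [hy])]
      rw [pvTpKeys]
      congr 1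
      rw [List.filter_map]
      congr 1
      refine List.filter_congr (fun z _ => by simp [Function.comp, hy])

theorem pvFilter_flatMap {α β : Type} (p : β → Bool) (g : α → List β) (l : List α) :
    (l.flatMap g).filter p = l.flatMap (fun x => (g x).filter p) := by
  induction l with
  | nil => rfl
  | cons x l ih => simp [List.flatMap_cons, List.filter_append, ih]

theorem pvFlatMap_congr {α β : Type} (g1 g2 : α → List β) (l : List α)
    (h : ∀ x ∈ l, g1 x = g2 x) : l.flatMap g1 = l.flatMap g2 := by
  induction l with
  | nil => rfl
  | cons x l ih =>
    simp only [List.flatMap_cons]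
    rw [h x (by simp), ih (fun x hx => h x (by simp [hx]))]

theorem pvFK_opsA : ∀ v : List (String × Int),
    pvFirstKeys [] (pvOpsA v) = pvTpKeys (PySem.Set.ofList (v.map Prod.fst)) := by
  intro v
  induction v with
  | nil => simp [pvOpsA, pvFirstKeys, PySem.Set.ofList_nil, pvTpKeys]
  | cons n w ih =>
    have hof : PySem.Set.ofList ((n :: w).map Prod.fst) =
        n.1 :: PySem.Set.discard (PySem.Set.ofList (w.map Prod.fst)) n.1 := by
      simp [PySem.Set.ofList_cons]
    have hdis : PySem.Set.discard (PySem.Set.ofList (w.map Prod.fst)) n.1 =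
        (PySem.Set.ofList (w.map Prod.fst)).filter (fun y => !(y == n.1)) := rfl
    have hsplit : pvOpsA (n :: w) =
        pvInnerOps n w ++ w.flatMap (fun n1 => pvInnerOps n1 (n :: w)) := by
      simp only [pvOpsA, List.flatMap_cons]
      congr 1
      simp [pvInnerOps]
    have hL1 : pvFirstKeys [] (pvInnerOps n w) =
        ((PySem.Set.ofList (w.map Prod.fst)).filter (fun y => !(y == n.1))).map
          (fun y => (n.1, y)) := by
      rw [pvFK_inner n w []]
      congr 1
      refine List.filter_congr (fun y _ => by simp [pvAnyM])
    set S := PySem.Set.ofList (w.map Prod.fst) with hSdef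
    set fL1 := (S.filter (fun y => !(y == n.1))).map (fun y => (n.1, y)) with hfL1
    have hmemS : ∀ n1 ∈ w, n1.1 ∈ S := by
      intro n1 h1
      rw [hSdef]
      exact (PySem.Set.mem_ofList _ _).mpr (List.mem_map_of_mem h1)
    -- the ops of L2 whose class involves n.1 are all matched by fL1
    have hL2filter : (w.flatMap (fun n1 => pvInnerOps n1 (n :: w))).filter
        (fun op => !pvAnyM fL1 op.1) = (pvOpsA w).filter (fun op => !pvAnyM fL1 op.1) := by
      rw [pvFilter_flatMap, pvOpsA, pvFilter_flatMap]
      refine pvFlatMap_congr _ _ w (fun n1 h1 => ?_)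
      by_cases hne : n1.1 = n.1
      · have : pvInnerOps n1 (n :: w) = pvInnerOps n1 w := by simp [pvInnerOps, hne]
        rw [this]
      · have : pvInnerOps n1 (n :: w) = ((n1.1, n.1), n1.2, n.2) :: pvInnerOps n1 w := by
          simp [pvInnerOps, hne]
        rw [this, List.filter_cons]
        rw [if_neg ?_]
        have hmem : ((n.1, n1.1) : String × String) ∈ fL1 := by
          rw [hfL1]
          refine List.mem_map.mpr ⟨n1.1, ?_, rfl⟩
          rw [List.mem_filter]
          exact ⟨hmemS n1 h1, by simp [hne]⟩
        have : pvAnyM fL1 (n1.1, n.1) = true := by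
          rw [pvAnyM_iff]
          exact ⟨(n.1, n1.1), hmem, by simp [pvMatchK_iff]⟩
        simp [this]
    have hGoal2 : (pvTpKeys S).filter (fun k => !pvAnyM fL1 k) =
        pvTpKeys (S.filter (fun y => !(y == n.1))) := by
      rw [← pvTpKeys_filter n.1 S]
      refine List.filter_congr (fun k hk => ?_)
      rcases pvTpKeys_mem S (by rw [hSdef]; exact PySem.Set.nodup_ofList _) k hk with ⟨h1, h2, h3⟩
      by_cases hc1 : k.1 = n.1
      · have hmem : ((n.1, k.2) : String × String) ∈ fL1 := by
          rw [hfL1]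
          refine List.mem_map.mpr ⟨k.2, ?_, rfl⟩
          rw [List.mem_filter]
          exact ⟨h2, by simp; intro hc; exact h3 (hc1.trans hc.symm)⟩
        have hany : pvAnyM fL1 k = true := by
          rw [pvAnyM_iff]
          refine ⟨(n.1, k.2), hmem, ?_⟩
          rw [pvMatchK_iff]
          left
          rw [← hc1]
        simp [hany, hc1]
      · by_cases hc2 : k.2 = n.1
        · have hmem : ((n.1, k.1) : String × String) ∈ fL1 := by
            rw [hfL1]
            refine List.mem_map.mpr ⟨k.1, ?_, rfl⟩
            rw [List.mem_filter]
            exact ⟨h1, by simp; exact fun hc => h3 (hc.trans hc2.symm)⟩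
          have hany : pvAnyM fL1 k = true := by
            rw [pvAnyM_iff]
            refine ⟨(n.1, k.1), hmem, ?_⟩
            rw [pvMatchK_iff]
            right
            rw [← hc2]
          simp [hany, hc2]
        · have hany : pvAnyM fL1 k = false := by
            rw [pvAnyM_eq_false]
            intro k' hk'
            rcases List.mem_map.mp hk' with ⟨y, _, rfl⟩
            rw [← Bool.not_eq_true, pvMatchK_iff]
            rintro (hc | hc)
            · exact hc1 (congrArg Prod.fst hc).symm
            · exact hc2 (congrArg Prod.fst hc).symm
          simp [hany, hc1, hc2]
    rw [hsplit, pvFirstKeys_append, List.append_nil, hL1]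
    rw [pvFirstKeys_filter _ fL1]
    rw [show pvFirstKeys [] (w.flatMap fun n1 => pvInnerOps n1 (n :: w)) =
        pvFirstKeys [] ((w.flatMap fun n1 => pvInnerOps n1 (n :: w))) from rfl]
    rw [← pvFirstKeys_filterOps _ fL1, hL2filter, pvFirstKeys_filterOps _ fL1, ih, hGoal2]
    rw [hof, hdis, pvTpKeys]

theorem pvGood_rowOps (agg : PySem.Dict String (Int × Int)) (x : String) (r : List String)
    (hx : x ∉ r) : pvGood (pvRowOps agg x r) := by
  intro op hop
  rcases List.mem_map.mp hop with ⟨y, hy, rfl⟩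
  intro hc
  simp only [] at hc
  exact hx (hc ▸ hy)

theorem pvGood_opsB (agg : PySem.Dict String (Int × Int)) :
    ∀ os : List String, os.Nodup → pvGood (pvOpsB agg os) := by
  intro os
  induction os with
  | nil => intro _ op hop; simp [pvOpsB] at hop
  | cons x r ih =>
    intro hnd op hop
    rcases List.nodup_cons.mp hnd with ⟨hx, hndr⟩
    rcases List.mem_append.mp hop with h | h
    · exact pvGood_rowOps agg x r hx op h
    · exact ih hndr op h

theorem pvFirstKeys_sub (L : List ((String × String) × Int × Int)) :
    ∀ ks k, k ∈ pvFirstKeys ks L → ∃ op ∈ L, k = op.1 := by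
  induction L with
  | nil => intro ks k h; simp [pvFirstKeys] at h
  | cons op L ih =>
    intro ks k h
    simp only [pvFirstKeys] at h
    by_cases hm : pvAnyM ks op.1 = true
    · rw [if_pos hm] at h
      rcases ih ks k h with ⟨op', h1, h2⟩
      exact ⟨op', by simp [h1], h2⟩
    · rw [if_neg hm] at h
      rcases List.mem_cons.mp h with rfl | h
      · exact ⟨op, by simp, rfl⟩
      · rcases ih _ k h with ⟨op', h1, h2⟩
        exact ⟨op', by simp [h1], h2⟩

theorem pvGroup_eq (v : List (String × Int)) (l : List ((String × String) × Int))
    (hcnd : pvCND l) (hgk : ∀ k ∈ l.map Prod.fst, k.1 ≠ k.2) :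
    pvFoldApply l (pvOpsA v) = pvFoldApply l (pvOpsB (pvAgg v).1 (pvAgg v).2) := by
  have hosnd : (pvAgg v).2.Nodup := by
    rw [pvAgg_order]; exact PySem.Set.nodup_ofList _
  have hgoodB : pvGood (pvOpsB (pvAgg v).1 (pvAgg v).2) := pvGood_opsB _ _ hosnd
  rw [pvPhi _ l (pvGood_opsA v) hcnd hgk, pvPhi _ l hgoodB hcnd hgk]
  have hfk : ∀ ks, pvFirstKeys ks (pvOpsA v) = pvFirstKeys ks (pvOpsB (pvAgg v).1 (pvAgg v).2) := by
    intro ks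
    rw [pvFirstKeys_filter (pvOpsA v) ks, pvFirstKeys_filter (pvOpsB (pvAgg v).1 (pvAgg v).2) ks]
    rw [pvFK_opsA v, pvFK_opsB _ _ hosnd, pvAgg_order]
  congr 1
  · refine List.map_congr_left (fun e he => ?_)
    have hne : e.1.1 ≠ e.1.2 := hgk e.1 (List.mem_map_of_mem he)
    have ht : pvTotal e.1 (pvOpsA v) = pvTotal e.1 (pvOpsB (pvAgg v).1 (pvAgg v).2) := by
      rcases e with ⟨⟨a, b⟩, w⟩
      exact pvTotal_eq v a b hne
    rw [ht]
  · rw [← hfk (l.map Prod.fst)]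
    refine List.map_congr_left (fun k hk => ?_)
    rcases pvFirstKeys_sub (pvOpsA v) _ k hk with ⟨op, hop, rfl⟩
    have hne : op.1.1 ≠ op.1.2 := pvGood_opsA v op hop
    have ht : pvTotal op.1 (pvOpsA v) = pvTotal op.1 (pvOpsB (pvAgg v).1 (pvAgg v).2) := by
      rcases op with ⟨⟨a, b⟩, t⟩
      exact pvTotal_eq v a b hne
    rw [ht]

theorem pvTop (ds : List (String × List (String × Int))) :
    ∀ d : PySem.Dict (String × String) Int, pvCND d.items →
      (∀ k ∈ d.items.map Prod.fst, k.1 ≠ k.2) →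
    ds.foldl (fun rep kv =>
      kv.2.foldl (fun rep n1 => kv.2.foldl (fun rep n2 =>
        if n1.1 ≠ n2.1 then
          if rep.contains (n1.1, n2.1) then rep.insert (n1.1, n2.1) (rep.getD (n1.1, n2.1) 0 + n1.2)
          else if rep.contains (n2.1, n1.1) then rep.insert (n2.1, n1.1) (rep.getD (n2.1, n1.1) 0 + n2.2)
          else rep.insert (n1.1, n2.1) n1.2
        else rep) rep) rep) d
    = ds.foldl (fun rep kv => pvPairLoop (pvAgg kv.2).1 (pvAgg kv.2).2 rep) d := by
  induction ds with
  | nil => intro d _ _; rfl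
  | cons kv ds ih =>
    intro d h1 h2
    simp only [List.foldl_cons]
    rw [pvA_outer kv.2 kv.2 d h1 h2]
    rw [pvB_loop (pvAgg kv.2).1 (pvAgg kv.2).2 d h1]
    have hops : kv.2.flatMap (fun n1 => pvInnerOps n1 kv.2) = pvOpsA kv.2 := rfl
    rw [hops, pvGroup_eq kv.2 d.items h1 h2]
    have hinv := pvInv_foldApply (pvOpsB (pvAgg kv.2).1 (pvAgg kv.2).2) d.items
      (pvGood_opsB _ _ (by rw [pvAgg_order]; exact PySem.Set.nodup_ofList _)) h1 h2
    exact ih _ hinv.1 hinv.2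

-- ===== VERDICT (by name: the statement is the Claim_ definition above) =====
theorem bi_to_uni_spec : Claim_equal_bi_to_uni := by
  intro data _
  unfold Spec_bi_to_uni bi_to_uni bi_to_uni_alt
  have h := pvTop data PySem.Dict.empty (by exact List.Pairwise.nil) (by intro k hk; simp [PySem.Dict.empty] at hk)
  show ((data.foldl _ (PySem.Dict.empty : PySem.Dict (String × String) Int)).items.map (fun e => (e.1.1, e.1.2, e.2))) = ((data.foldl (fun rep kv => pvPairLoop (pvAgg kv.2).1 (pvAgg kv.2).2 rep) (PySem.Dict.empty : PySem.Dict (String × String) Int)).items.map (fun e => (e.1.1, e.1.2, e.2)))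
  rw [h]
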